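-- pv_equiv track=rewrite | github.com/lxucs/multilingual-sl | ner/run_tag_sl.py | _get_final_selected_indices
-- ===== SOURCE A (Python) =====
-- def _get_final_selected_indices(selected_idx, all_idx, idx_more_than_one_type):
--     final_idx = []  # Final instance indices to select; must be either in only one or all types
--     types = tuple(selected_idx.keys())
--     merged_selected_idx = set().union(*[indices for t, indices in selected_idx.items()])
--     idx_more_than_one_type = set(idx_more_than_one_type)
--     for idx in merged_selected_idx:
--         if idx not in idx_more_than_one_type:
--             final_idx.append(idx)
--         else:
--             valid = True
--             for t in types:
--                 if idx in all_idx[t] and idx not in selected_idx[t]: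
--                     valid = False
--                     break
--             if valid:
--                 final_idx.append(idx)
--     return final_idx
-- ===== SOURCE B (Python) =====
-- def _get_final_selected_indices(selected_idx, all_idx, idx_more_than_one_type):
--     # Type-major pass: invalidate indices per type, keeping a 'pending' set of
--     # indices in more than one type that are not yet invalidated; stop early
--     # once nothing is pending.
--     more = set(idx_more_than_one_type)
--     merged_selected_idx = set().union(*selected_idx.values())
--     pending = {i for i in merged_selected_idx if i in more}
--     invalid = set()
--     for t, sel in selected_idx.items():
--         if not pending:
--             break
--         pool = set(all_idx[t])
--         newly = {i for i in pending if i in pool and i not in sel}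
--         invalid |= newly
--         pending -= newly
--     return [idx for idx in merged_selected_idx
--             if idx not in more or idx not in invalid]
-- ===== Notes on version B (the rewrite author's own statement) =====
-- stated objective: alternative
-- what changed: A does an index-major nested scan (for each merged index, re-scan every NER type with an inner break); B does one type-major pass that builds an 'invalid' set while shrinking a 'pending' set of indices still awaiting validation, then decides each index with two flat membership tests.
import Mathlib
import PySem

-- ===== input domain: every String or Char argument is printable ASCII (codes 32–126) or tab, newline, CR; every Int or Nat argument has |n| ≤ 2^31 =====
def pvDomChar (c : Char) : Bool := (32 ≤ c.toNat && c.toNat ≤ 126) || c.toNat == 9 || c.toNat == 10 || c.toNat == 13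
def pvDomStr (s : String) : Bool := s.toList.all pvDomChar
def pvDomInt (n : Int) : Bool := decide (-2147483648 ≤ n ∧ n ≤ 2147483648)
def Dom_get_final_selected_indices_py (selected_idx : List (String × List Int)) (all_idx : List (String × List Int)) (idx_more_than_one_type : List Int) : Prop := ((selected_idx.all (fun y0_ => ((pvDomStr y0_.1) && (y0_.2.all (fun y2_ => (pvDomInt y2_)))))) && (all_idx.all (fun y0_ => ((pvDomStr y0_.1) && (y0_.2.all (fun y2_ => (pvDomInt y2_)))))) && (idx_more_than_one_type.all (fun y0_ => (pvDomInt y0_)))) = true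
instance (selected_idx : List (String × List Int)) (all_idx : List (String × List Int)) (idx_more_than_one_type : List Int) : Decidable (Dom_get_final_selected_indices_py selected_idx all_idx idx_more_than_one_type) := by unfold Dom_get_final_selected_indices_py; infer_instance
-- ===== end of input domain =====

-- B replaces A's index-major nested scan by a type-major single pass maintaining a shrinking 'pending' set (a different decomposition of the same work).
-- ===== PORT A =====
-- the inner 'for t in types: … break' loop of A (Python raises KeyError on a missing all_idx key; getD is used
-- under Pre_, which guarantees the scan never reaches a missing key, so the default is never taken there)
def pvValidA (dsel dall : PySem.Dict String (List Int)) (idx : Int) : List String → Bool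
  | [] => true
  | t :: ts =>
      if PySem.Set.contains (dall.getD t []) idx && !(PySem.Set.contains (dsel.getD t []) idx) then false
      else pvValidA dsel dall idx ts

def get_final_selected_indices_py (selected_idx : List (String × List Int)) (all_idx : List (String × List Int)) (idx_more_than_one_type : List Int) : List Int :=
  let dsel := PySem.Dict.mk selected_idx
  let dall := PySem.Dict.mk all_idx
  let types := dsel.keys
  let merged_selected_idx := dsel.items.foldl (fun s p => PySem.Set.update s p.2) PySem.Set.empty
  let moreS := PySem.Set.ofList idx_more_than_one_type
  merged_selected_idx.foldl
    (fun final_idx idx =>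
      if !(PySem.Set.contains moreS idx) then final_idx ++ [idx]
      else if pvValidA dsel dall idx types then final_idx ++ [idx] else final_idx) []

-- ===== PORT B =====
-- Source B's type-major loop: 'for t, sel in selected_idx.items(): if not pending: break; …'
-- (Source B's 'all_idx[t]' raises KeyError there; under Pre_ the loop only touches present keys, so getD's default is never taken)
def pvInvalidB (dall : PySem.Dict String (List Int)) : List (String × List Int) → PySem.Set Int → PySem.Set Int → PySem.Set Int
  | [], _, invalid => invalid
  | p :: rest, pending, invalid =>
      if pending = [] then invalid
      else
        let pool := PySem.Set.ofList (dall.getD p.1 [])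
        let newly := pending.filter (fun i => PySem.Set.contains pool i && !(PySem.Set.contains p.2 i))
        pvInvalidB dall rest (PySem.Set.diff pending newly) (PySem.Set.union invalid newly)

def get_final_selected_indices_py_alt (selected_idx : List (String × List Int)) (all_idx : List (String × List Int)) (idx_more_than_one_type : List Int) : List Int :=
  let dsel := PySem.Dict.mk selected_idx
  let dall := PySem.Dict.mk all_idx
  let more := PySem.Set.ofList idx_more_than_one_type
  let merged_selected_idx := dsel.values.foldl (fun s v => PySem.Set.update s v) PySem.Set.empty
  let pending := merged_selected_idx.filter (fun i => PySem.Set.contains more i)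
  let invalid := pvInvalidB dall dsel.items pending PySem.Set.empty
  merged_selected_idx.foldl
    (fun acc idx =>
      if !(PySem.Set.contains more idx) || !(PySem.Set.contains invalid idx) then acc ++ [idx] else acc) []

-- ===== PRECONDITION & SPEC =====
-- 'type t disqualifies idx': idx is in t's pool (missing pool = empty) but was not selected for t
def pvStop (selected_idx all_idx : List (String × List Int)) (idx : Int) (t : String) : Prop :=
  idx ∈ (PySem.Dict.mk all_idx).getD t [] ∧ idx ∉ (PySem.Dict.mk selected_idx).getD t []

-- A's inner scan never reaches a selected_idx key missing from all_idx: for every selected index that is in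
-- idx_more_than_one_type, any missing key at position i of the key list is preceded by a key that already
-- disqualifies the index (A breaks there before the KeyError; B's per-type pass raises on the same inputs)
def pvScanOK (selected_idx all_idx : List (String × List Int)) (idx_more_than_one_type : List Int) : Prop :=
  ∀ p ∈ selected_idx, ∀ idx ∈ p.2, idx ∈ idx_more_than_one_type →
    ∀ i ∈ List.range selected_idx.length,
      (selected_idx.map Prod.fst).getD i "" ∉ all_idx.map Prod.fst →
        ∃ j ∈ List.range i, pvStop selected_idx all_idx idx ((selected_idx.map Prod.fst).getD j "")

-- Pre_ excludes (i) association lists with duplicate selected_idx keys, unreachable from Python dicts, and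
-- (ii) exactly the inputs on which both A and B raise KeyError (the scan reaches a selected_idx key missing from all_idx)
def Pre_get_final_selected_indices_py (selected_idx : List (String × List Int)) (all_idx : List (String × List Int)) (idx_more_than_one_type : List Int) : Prop :=
  (selected_idx.map Prod.fst).Nodup ∧ pvScanOK selected_idx all_idx idx_more_than_one_type
instance (selected_idx : List (String × List Int)) (all_idx : List (String × List Int)) (idx_more_than_one_type : List Int) : Decidable (Pre_get_final_selected_indices_py selected_idx all_idx idx_more_than_one_type) := by unfold Pre_get_final_selected_indices_py pvScanOK pvStop; infer_instance

def pvWitness_get_final_selected_indices_py : (List (String × List Int)) × (List (String × List Int)) × List Int :=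
  ([("PER", [1, 2]), ("LOC", [2])], [("PER", [1, 2, 3]), ("LOC", [2, 3])], [2, 3])

def Spec_get_final_selected_indices_py (selected_idx : List (String × List Int)) (all_idx : List (String × List Int)) (idx_more_than_one_type : List Int) (out : List Int) : Prop := out = get_final_selected_indices_py_alt selected_idx all_idx idx_more_than_one_type
instance (selected_idx : List (String × List Int)) (all_idx : List (String × List Int)) (idx_more_than_one_type : List Int) (out : List Int) : Decidable (Spec_get_final_selected_indices_py selected_idx all_idx idx_more_than_one_type out) := by unfold Spec_get_final_selected_indices_py; infer_instance

-- ===== CLAIM (what is proved, stated in full; the proofs are below) =====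
def Claim_equal_get_final_selected_indices_py : Prop := ∀ (selected_idx : List (String × List Int)) (all_idx : List (String × List Int)) (idx_more_than_one_type : List Int), Dom_get_final_selected_indices_py selected_idx all_idx idx_more_than_one_type → Pre_get_final_selected_indices_py selected_idx all_idx idx_more_than_one_type → Spec_get_final_selected_indices_py selected_idx all_idx idx_more_than_one_type (get_final_selected_indices_py selected_idx all_idx idx_more_than_one_type)

-- ===== LEMMAS AND PROOFS =====

-- Bool/Prop bridge for set membership, specific to this file's Int sets
theorem pvContains_eq_true_iff (s : List Int) (x : Int) : PySem.Set.contains s x = true ↔ x ∈ s := by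
  simp [PySem.Set.contains_eq_listContains]

-- A's inner loop returns false exactly when some type invalidates idx (the break does not change the value)
theorem pvValidA_eq_false_iff (dsel dall : PySem.Dict String (List Int)) (idx : Int) (ts : List String) :
    pvValidA dsel dall idx ts = false ↔ ∃ t ∈ ts, idx ∈ dall.getD t [] ∧ idx ∉ dsel.getD t [] := by
  induction ts with
  | nil => simp [pvValidA]
  | cons t ts ih =>
      simp only [pvValidA, List.mem_cons]
      split_ifs with h
      · simp only [true_iff]
        simp only [Bool.and_eq_true, Bool.not_eq_true'] at h
        refine ⟨t, Or.inl rfl, (pvContains_eq_true_iff _ _).mp h.1, fun hc => ?_⟩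
        rw [(pvContains_eq_true_iff _ _).mpr hc] at h
        exact absurd h.2 (by simp)
      · rw [ih]
        constructor
        · rintro ⟨u, hu, hmem⟩; exact ⟨u, Or.inr hu, hmem⟩
        · rintro ⟨u, hu | hu, hmem⟩
          · subst hu
            exfalso
            apply h
            simp only [Bool.and_eq_true, Bool.not_eq_true']
            refine ⟨(pvContains_eq_true_iff _ _).mpr hmem.1, ?_⟩
            cases hc : PySem.Set.contains (dsel.getD u []) idx
            · rfl
            · exact absurd ((pvContains_eq_true_iff _ _).mp hc) hmem.2
          · exact ⟨u, hu, hmem⟩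

-- membership in B's result set: invalid indices are the pending ones disqualified by some type
theorem mem_pvInvalidB (dall : PySem.Dict String (List Int)) (l : List (String × List Int))
    (pending invalid : PySem.Set Int) (x : Int) :
    x ∈ pvInvalidB dall l pending invalid ↔
      x ∈ invalid ∨ (x ∈ pending ∧ ∃ p ∈ l, x ∈ dall.getD p.1 [] ∧ x ∉ p.2) := by
  induction l generalizing pending invalid with
  | nil => simp [pvInvalidB]
  | cons p l ih =>
      by_cases hp : pending = []
      · subst hp; simp [pvInvalidB]
      · rw [pvInvalidB, if_neg hp, ih]
        simp only [PySem.Set.mem_union, PySem.Set.mem_diff, List.mem_filter, List.mem_cons,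
          Bool.and_eq_true, Bool.not_eq_true', PySem.Set.mem_ofList,
          PySem.Set.contains_eq_listContains, List.contains_eq_mem, decide_eq_false_iff_not,
          decide_eq_true_eq]
        constructor
        · rintro ((h | ⟨hpend, hpool, hsel⟩) | ⟨⟨hpend, hnot⟩, q, hq, hmq⟩)
          · exact Or.inl h
          · exact Or.inr ⟨hpend, p, Or.inl rfl, hpool, hsel⟩
          · exact Or.inr ⟨hpend, q, Or.inr hq, hmq⟩
        · rintro (h | ⟨hpend, q, rfl | hq, hmq⟩)
          · exact Or.inl (Or.inl h)
          · exact Or.inl (Or.inr ⟨hpend, hmq.1, hmq.2⟩)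
          · by_cases hnew : x ∈ dall.getD p.1 [] ∧ x ∉ p.2
            · exact Or.inl (Or.inr ⟨hpend, hnew.1, hnew.2⟩)
            · exact Or.inr ⟨⟨hpend, fun hc => hnew ⟨hc.2.1, hc.2.2⟩⟩, q, hq, hmq⟩

-- with unique keys, scanning the key list is the same as scanning the items
theorem exists_key_iff_exists_item (dsel dall : PySem.Dict String (List Int)) (idx : Int)
    (hnd : dsel.keys.Nodup) :
    (∃ t ∈ dsel.keys, idx ∈ dall.getD t [] ∧ idx ∉ dsel.getD t []) ↔
      ∃ p ∈ dsel.items, idx ∈ dall.getD p.1 [] ∧ idx ∉ p.2 := by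
  constructor
  · rintro ⟨t, ht, hall, hsel⟩
    have : t ∈ dsel.items.map Prod.fst := ht
    obtain ⟨p, hp, hpt⟩ := List.mem_map.mp this
    refine ⟨p, hp, by rwa [hpt], ?_⟩
    have hg := PySem.Dict.getD_of_mem_items (d := dsel) (k := p.1) (v := p.2) (d0 := []) (by simpa using hp) hnd
    rw [hpt] at hg
    rw [hg] at hsel
    exact hsel
  · rintro ⟨p, hp, hall, hsel⟩
    refine ⟨p.1, List.mem_map.mpr ⟨p, hp, rfl⟩, hall, ?_⟩
    have hg := PySem.Dict.getD_of_mem_items (d := dsel) (k := p.1) (v := p.2) (d0 := []) (by simpa using hp) hnd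
    rw [hg]
    exact hsel

-- ===== VERDICT (by name: the statement is the Claim_ definition above) =====
theorem get_final_selected_indices_py_spec : Claim_equal_get_final_selected_indices_py := by
  intro selected_idx all_idx idx_more_than_one_type _hdom hpre
  obtain ⟨hnd, _hscan⟩ := hpre
  have hndk : (PySem.Dict.mk selected_idx).keys.Nodup := by
    simpa [PySem.Dict.keys] using hnd
  unfold Spec_get_final_selected_indices_py
  simp only [get_final_selected_indices_py, get_final_selected_indices_py_alt,
    PySem.Dict.values, List.foldl_map]
  set dsel := PySem.Dict.mk selected_idx with hdsel
  set dall := PySem.Dict.mk all_idx with hdall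
  set moreS := PySem.Set.ofList idx_more_than_one_type with hmoreS
  set merged := dsel.items.foldl (fun s p => PySem.Set.update s p.2) PySem.Set.empty with hmerged
  set pending := merged.filter (fun i => PySem.Set.contains moreS i) with hpending
  set inv := pvInvalidB dall dsel.items pending PySem.Set.empty with hinv
  apply PySem.List.foldl_congr_mem
  intro acc idx hidx
  by_cases hm : PySem.Set.contains moreS idx = true
  · have hpendmem : idx ∈ pending := by
      rw [hpending]
      exact List.mem_filter.mpr ⟨hidx, hm⟩
    have hiffinv : idx ∈ inv ↔ ∃ p ∈ dsel.items, idx ∈ dall.getD p.1 [] ∧ idx ∉ p.2 := by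
      rw [hinv, mem_pvInvalidB]
      simp [PySem.Set.empty, hpendmem]
    have hvalid : pvValidA dsel dall idx dsel.keys = !(PySem.Set.contains inv idx) := by
      by_cases hin : idx ∈ inv
      · have hfalse : pvValidA dsel dall idx dsel.keys = false := by
          rw [pvValidA_eq_false_iff, exists_key_iff_exists_item dsel dall idx hndk]
          exact hiffinv.mp hin
        rw [hfalse, (pvContains_eq_true_iff _ _).mpr hin]
        rfl
      · have hcf : PySem.Set.contains inv idx = false := by
          cases hc : PySem.Set.contains inv idx
          · rfl
          · exact absurd ((pvContains_eq_true_iff _ _).mp hc) hin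
        have htrue : pvValidA dsel dall idx dsel.keys = true := by
          cases hv : pvValidA dsel dall idx dsel.keys
          · exact absurd (hiffinv.mpr ((exists_key_iff_exists_item dsel dall idx hndk).mp
              ((pvValidA_eq_false_iff dsel dall idx dsel.keys).mp hv))) hin
          · rfl
        rw [htrue, hcf]
        rfl
    rw [hm, hvalid]
    cases PySem.Set.contains inv idx <;> simp
  · have hmf : PySem.Set.contains moreS idx = false := by
      cases hc : PySem.Set.contains moreS idx
      · rfl
      · exact absurd hc hm
    rw [hmf]
    simp
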